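-- pv_equiv track=rewrite | github.com/MoeenNehzati/video | scripts/add_violin_to_bach.py | pick_bucket_pitch
-- ===== SOURCE A (Python) =====
-- def pick_bucket_pitch(events, start, end):
--     bucket = [event for event in events if start <= event["onset"] < end]
--     if not bucket:
--         bucket = [event for event in events if event["onset"] >= start]
--     if not bucket:
--         bucket = [event for event in events if event["onset"] < start]
--     if not bucket:
--         return None
--     return max(bucket, key=lambda event: (event["midi"], -event["onset"]))["midi"]
-- ===== SOURCE B (Python) =====
-- def pick_bucket_pitch(events, start, end):
--     best = None
--     for event in events:
--         onset = event["onset"]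
--         if start <= onset < end:
--             tier = 2
--         elif onset >= start:
--             tier = 1
--         else:
--             tier = 0
--         key = (tier, event["midi"], -onset)
--         if best is None or key > best:
--             best = key
--     return None if best is None else best[1]
-- ===== Notes on version B (the rewrite author's own statement) =====
-- stated objective: alternative
-- what changed: Replaces the three filtered comprehensions with cascading fallbacks plus a final keyed max by one single pass that tracks the best (tier, midi, -onset) triple, where the tier (2 = in bucket, 1 = at/after start, 0 = before start) encodes the fallback order.
-- outside the precondition, e.g. on pick_bucket_pitch([{'onset': 5}, {'onset': 1, 'midi': 60}], 0, 2): A returns 60, B raises KeyError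
import Mathlib
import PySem

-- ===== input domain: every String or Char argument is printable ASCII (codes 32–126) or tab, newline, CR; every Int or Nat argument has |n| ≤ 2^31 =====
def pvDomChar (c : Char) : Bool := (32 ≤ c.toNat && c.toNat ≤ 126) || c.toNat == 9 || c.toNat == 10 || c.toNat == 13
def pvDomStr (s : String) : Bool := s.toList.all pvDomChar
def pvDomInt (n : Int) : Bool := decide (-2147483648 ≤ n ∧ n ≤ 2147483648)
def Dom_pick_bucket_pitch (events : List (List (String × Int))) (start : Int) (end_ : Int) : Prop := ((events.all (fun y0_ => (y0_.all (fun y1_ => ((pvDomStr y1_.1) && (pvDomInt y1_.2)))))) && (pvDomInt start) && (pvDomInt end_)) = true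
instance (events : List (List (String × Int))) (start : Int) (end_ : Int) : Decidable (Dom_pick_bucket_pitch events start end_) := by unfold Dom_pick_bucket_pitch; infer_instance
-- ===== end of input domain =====

-- B replaces A's three filtered comprehensions with cascading fallbacks plus a keyed max by one
-- single pass tracking the best (tier, midi, -onset) triple (alternative decomposition, same O(n)).


-- ===== PORT A =====
-- event[k] for an event dict; exact under Pre_ (key present, keys distinct)
def evGet (e : List (String × Int)) (k : String) : Int :=
  (((e.find? (fun p => p.1 == k)).map Prod.snd).getD 0)

def pick_bucket_pitch (events : List (List (String × Int))) (start : Int) (end_ : Int) : Option Int :=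
  let b1 := events.filter (fun e => decide (start ≤ evGet e "onset") && decide (evGet e "onset" < end_))
  let b2 := if b1.isEmpty then events.filter (fun e => decide (evGet e "onset" ≥ start)) else b1
  let b3 := if b2.isEmpty then events.filter (fun e => decide (evGet e "onset" < start)) else b2
  if b3.isEmpty then none
  else (PySem.List.max2? b3 (fun e => evGet e "midi") (fun e => -(evGet e "onset"))).map
    (fun e => evGet e "midi")

-- ===== PORT B =====
def tierB (start end_ onset : Int) : Int :=
  if start ≤ onset ∧ onset < end_ then 2 else if onset ≥ start then 1 else 0

def key3 (start end_ : Int) (e : List (String × Int)) : Int × Int × Int :=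
  (tierB start end_ (evGet e "onset"), evGet e "midi", -(evGet e "onset"))

-- Python tuple '<' on int triples (lexicographic)
def lt3 (a b : Int × Int × Int) : Bool :=
  decide (a.1 < b.1) || (a.1 == b.1 && (decide (a.2.1 < b.2.1) || (a.2.1 == b.2.1 && decide (a.2.2 < b.2.2))))

def pick_bucket_pitch_alt (events : List (List (String × Int))) (start : Int) (end_ : Int) : Option Int :=
  (events.foldl (fun best e =>
      let k := key3 start end_ e
      match best with
      | none => some k
      | some b => if lt3 b k then some k else some b) none).map (fun b => b.2.1)

-- ===== PRECONDITION & SPEC =====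
-- Pre_ excludes event dicts with duplicate keys (a defensible association-list corner of the dict
-- model, on which both programs still agree in Python) and events missing the "onset" key (A raises
-- KeyError) or the "midi" key (A raises KeyError when the event lands in the selected bucket, and
-- the natural single-pass B raises KeyError on it in every case).
def Pre_pick_bucket_pitch (events : List (List (String × Int))) (start : Int) (end_ : Int) : Prop :=
  ∀ e ∈ events, (e.map Prod.fst).Nodup ∧ "onset" ∈ e.map Prod.fst ∧ "midi" ∈ e.map Prod.fst
instance (events : List (List (String × Int))) (start : Int) (end_ : Int) : Decidable (Pre_pick_bucket_pitch events start end_) := by unfold Pre_pick_bucket_pitch; infer_instance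

def pvWitness_pick_bucket_pitch : (List (List (String × Int))) × Int × Int :=
  ([[("onset", 1), ("midi", 60)], [("onset", 7), ("midi", 55)]], 0, 2)

def Spec_pick_bucket_pitch (events : List (List (String × Int))) (start : Int) (end_ : Int) (out : Option Int) : Prop := out = pick_bucket_pitch_alt events start end_
instance (events : List (List (String × Int))) (start : Int) (end_ : Int) (out : Option Int) : Decidable (Spec_pick_bucket_pitch events start end_ out) := by unfold Spec_pick_bucket_pitch; infer_instance

-- ===== CLAIM (what is proved, stated in full; the proofs are below) =====
def Claim_equal_pick_bucket_pitch : Prop := ∀ (events : List (List (String × Int))) (start : Int) (end_ : Int), Dom_pick_bucket_pitch events start end_ → Pre_pick_bucket_pitch events start end_ → Spec_pick_bucket_pitch events start end_ (pick_bucket_pitch events start end_)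

-- ===== LEMMAS AND PROOFS =====

theorem lt3_iff (a b : Int × Int × Int) : lt3 a b = true ↔
    (a.1 < b.1 ∨ (a.1 = b.1 ∧ (a.2.1 < b.2.1 ∨ (a.2.1 = b.2.1 ∧ a.2.2 < b.2.2)))) := by
  simp [lt3]

theorem tierB_le_two (start end_ o : Int) : tierB start end_ o ≤ 2 := by
  unfold tierB; split_ifs <;> omega

-- invariant of B's fold started at `some b`
theorem foldB_inv (start end_ : Int) (l : List (List (String × Int))) (b : Int × Int × Int) :
    ∃ c, (l.foldl (fun best e =>
        let k := key3 start end_ e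
        match best with
        | none => some k
        | some b => if lt3 b k then some k else some b) (some b)) = some c ∧
      (c = b ∨ ∃ e ∈ l, c = key3 start end_ e) ∧
      lt3 c b = false ∧ ∀ e ∈ l, lt3 c (key3 start end_ e) = false := by
  induction l generalizing b with
  | nil =>
    refine ⟨b, rfl, Or.inl rfl, ?_, by simp⟩
    obtain ⟨x, y, z⟩ := b
    rw [Bool.eq_false_iff, ne_eq, lt3_iff]; omega
  | cons e t ih =>
    by_cases hk : lt3 b (key3 start end_ e) = true
    · obtain ⟨c, hc, hmem, hcb, hall⟩ := ih (key3 start end_ e)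
      refine ⟨c, by simpa [hk] using hc, ?_, ?_, ?_⟩
      · rcases hmem with h | ⟨e', he', h⟩
        · exact Or.inr ⟨e, by simp, h⟩
        · exact Or.inr ⟨e', by simp [he'], h⟩
      · -- b < k, ¬ c < k ⇒ ¬ c < b
        generalize key3 start end_ e = K at hk hcb
        obtain ⟨b1, b2, b3⟩ := b
        obtain ⟨k1, k2, k3⟩ := K
        obtain ⟨c1, c2, c3⟩ := c
        rw [lt3_iff] at hk
        rw [Bool.eq_false_iff, ne_eq, lt3_iff] at hcb ⊢
        dsimp only at *
        omega
      · intro e' he'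
        rcases List.mem_cons.mp he' with h | h
        · subst h; exact hcb
        · exact hall e' h
    · rw [Bool.not_eq_true] at hk
      obtain ⟨c, hc, hmem, hcb, hall⟩ := ih b
      refine ⟨c, by simpa [hk] using hc, ?_, hcb, ?_⟩
      · rcases hmem with h | ⟨e', he', h⟩
        · exact Or.inl h
        · exact Or.inr ⟨e', by simp [he'], h⟩
      · intro e' he'
        rcases List.mem_cons.mp he' with h | h
        · -- ¬ b < k, ¬ c < b ⇒ ¬ c < k
          rw [h]
          generalize key3 start end_ e = K at hk ⊢
          obtain ⟨b1, b2, b3⟩ := b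
          obtain ⟨k1, k2, k3⟩ := K
          obtain ⟨c1, c2, c3⟩ := c
          rw [Bool.eq_false_iff, ne_eq, lt3_iff] at hk hcb ⊢
          dsimp only at *
          omega
        · exact hall e' h

-- invariant of A's keyed-max fold: the result's midi dominates all midis seen
theorem foldA_gen (f : Option (List (String × Int)) → List (String × Int) → Option (List (String × Int)))
    (hsome : ∀ m x, f (some m) x = some m ∨ f (some m) x = some x)
    (hkeep : ∀ m x, f (some m) x = some m → evGet x "midi" ≤ evGet m "midi")
    (hrepl : ∀ m x, f (some m) x = some x → evGet m "midi" ≤ evGet x "midi")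
    (l : List (List (String × Int))) (m : List (String × Int)) :
    ∃ c, l.foldl f (some m) = some c ∧ (c = m ∨ c ∈ l) ∧
      evGet m "midi" ≤ evGet c "midi" ∧ ∀ y ∈ l, evGet y "midi" ≤ evGet c "midi" := by
  induction l generalizing m with
  | nil => exact ⟨m, rfl, Or.inl rfl, le_refl _, by simp⟩
  | cons x t ih =>
    rcases hsome m x with h | h
    · obtain ⟨c, hc, hmem, hle, hall⟩ := ih m
      refine ⟨c, by rw [List.foldl_cons, h]; exact hc, ?_, hle, ?_⟩
      · rcases hmem with h' | h'
        · exact Or.inl h'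
        · exact Or.inr (by simp [h'])
      · intro y hy
        rcases List.mem_cons.mp hy with h' | h'
        · subst h'; exact le_trans (hkeep m y h) hle
        · exact hall y h'
    · obtain ⟨c, hc, hmem, hle, hall⟩ := ih x
      refine ⟨c, by rw [List.foldl_cons, h]; exact hc, ?_, le_trans (hrepl m x h) hle, ?_⟩
      · rcases hmem with h' | h'
        · exact Or.inr (by simp [h'])
        · exact Or.inr (by simp [h'])
      · intro y hy
        rcases List.mem_cons.mp hy with h' | h'
        · subst h'; exact hle
        · exact hall y h'

theorem max2?_midi (l : List (List (String × Int))) (hl : l ≠ []) :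
    ∃ c ∈ l, (PySem.List.max2? l (fun e => evGet e "midi") (fun e => -(evGet e "onset"))) = some c ∧
      ∀ y ∈ l, evGet y "midi" ≤ evGet c "midi" := by
  obtain ⟨x, t, rfl⟩ := List.exists_cons_of_ne_nil hl
  unfold PySem.List.max2?
  have hsome : ∀ (m x : List (String × Int)),
      (fun (acc : Option (List (String × Int))) (x : List (String × Int)) =>
        match acc with
        | none => some x
        | some m =>
          if (decide (evGet m "midi" < evGet x "midi") ||
              !decide (evGet x "midi" < evGet m "midi") && decide (-(evGet m "onset") < -(evGet x "onset"))) = true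
          then some x else some m) (some m) x = some m ∨
      (fun (acc : Option (List (String × Int))) (x : List (String × Int)) =>
        match acc with
        | none => some x
        | some m =>
          if (decide (evGet m "midi" < evGet x "midi") ||
              !decide (evGet x "midi" < evGet m "midi") && decide (-(evGet m "onset") < -(evGet x "onset"))) = true
          then some x else some m) (some m) x = some x := by
    intro m x
    dsimp only
    split
    · exact Or.inr rfl
    · exact Or.inl rfl
  have hkeep : ∀ (m x : List (String × Int)), (fun (acc : Option (List (String × Int))) (x : List (String × Int)) =>
        match acc with
        | none => some x
        | some m =>
          if (decide (evGet m "midi" < evGet x "midi") ||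
              !decide (evGet x "midi" < evGet m "midi") && decide (-(evGet m "onset") < -(evGet x "onset"))) = true
          then some x else some m) (some m) x = some m → evGet x "midi" ≤ evGet m "midi" := by
    intro m x hf
    dsimp only at hf
    split at hf
    · injection hf with h2; rw [h2]
    · rename_i h
      simp only [Bool.or_eq_true, Bool.and_eq_true, Bool.not_eq_true', decide_eq_true_iff,
        decide_eq_false_iff_not, not_or, not_and] at h
      omega
  have hrepl : ∀ (m x : List (String × Int)), (fun (acc : Option (List (String × Int))) (x : List (String × Int)) =>
        match acc with
        | none => some x
        | some m =>
          if (decide (evGet m "midi" < evGet x "midi") ||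
              !decide (evGet x "midi" < evGet m "midi") && decide (-(evGet m "onset") < -(evGet x "onset"))) = true
          then some x else some m) (some m) x = some x → evGet m "midi" ≤ evGet x "midi" := by
    intro m x hf
    dsimp only at hf
    split at hf
    · rename_i h
      simp only [Bool.or_eq_true, Bool.and_eq_true, Bool.not_eq_true', decide_eq_true_iff,
        decide_eq_false_iff_not] at h
      omega
    · injection hf with h2; rw [h2]
  obtain ⟨c, hc, hmem, hxle, hall⟩ := foldA_gen (fun (acc : Option (List (String × Int))) (x : List (String × Int)) =>
        match acc with
        | none => some x
        | some m =>
          if (decide (evGet m "midi" < evGet x "midi") ||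
              !decide (evGet x "midi" < evGet m "midi") && decide (-(evGet m "onset") < -(evGet x "onset"))) = true
          then some x else some m) hsome hkeep hrepl t x
  refine ⟨c, ?_, ?_, ?_⟩
  · rcases hmem with h | h
    · simp [h]
    · simp [h]
  · rw [List.foldl_cons]
    refine Eq.trans ?_ hc
    congr 1
    all_goals first
      | rfl
      | (funext acc y; cases acc <;> rfl)
  · intro y hy
    rcases List.mem_cons.mp hy with h | h
    · subst h; exact hxle
    · exact hall y h


theorem lt3_false_le (c k : Int × Int × Int) (h : lt3 c k = false) :
    k.1 ≤ c.1 ∧ (k.1 = c.1 → k.2.1 ≤ c.2.1) := by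
  obtain ⟨c1, c2, c3⟩ := c
  obtain ⟨k1, k2, k3⟩ := k
  rw [Bool.eq_false_iff, ne_eq, lt3_iff] at h
  dsimp only at *
  omega

theorem tier_eq_two_iff (s e o : Int) : tierB s e o = 2 ↔ (s ≤ o ∧ o < e) := by
  unfold tierB; split_ifs <;> omega

theorem tier_eq_one_iff (s e o : Int) (h : ¬ (s ≤ o ∧ o < e)) : tierB s e o = 1 ↔ s ≤ o := by
  unfold tierB; split_ifs <;> omega

theorem tier_eq_zero_iff (s e o : Int) : tierB s e o = 0 ↔ o < s := by
  unfold tierB; split_ifs <;> omega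

theorem bucket_max (events B3 : List (List (String × Int))) (start end_ T : Int) (c : Int × Int × Int)
    (hb3ne : B3 ≠ [])
    (hmemiff : ∀ y, y ∈ B3 ↔ (y ∈ events ∧ tierB start end_ (evGet y "onset") = T))
    (htop : ∀ e ∈ events, tierB start end_ (evGet e "onset") ≤ T)
    (hex : ∃ e ∈ events, c = key3 start end_ e)
    (hall : ∀ e ∈ events, lt3 c (key3 start end_ e) = false) :
    (PySem.List.max2? B3 (fun e => evGet e "midi") (fun e => -(evGet e "onset"))).map
      (fun e => evGet e "midi") = some c.2.1 := by
  obtain ⟨e0, he0, hck⟩ := hex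
  obtain ⟨cA, hcAmem, hcAeq, hcAmax⟩ := max2?_midi B3 hb3ne
  -- c.1 = T
  obtain ⟨w, hw⟩ := List.exists_mem_of_ne_nil B3 hb3ne
  have hwev := (hmemiff w).mp hw
  have hwle := lt3_false_le c (key3 start end_ w) (hall w hwev.1)
  have hc1 : c.1 = T := by
    have h1 : c.1 = tierB start end_ (evGet e0 "onset") := by rw [hck]; rfl
    have h2 : (key3 start end_ w).1 = tierB start end_ (evGet w "onset") := rfl
    have := htop e0 he0
    omega
  have hc21 : c.2.1 = evGet e0 "midi" := by rw [hck]; rfl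
  -- e0 ∈ B3
  have he0B : e0 ∈ B3 := by
    refine (hmemiff e0).mpr ⟨he0, ?_⟩
    have h1 : c.1 = tierB start end_ (evGet e0 "onset") := by rw [hck]; rfl
    omega
  -- midi cA = c.2.1
  have hle1 : evGet cA "midi" ≤ c.2.1 := by
    have hcAev := (hmemiff cA).mp hcAmem
    have := lt3_false_le c (key3 start end_ cA) (hall cA hcAev.1)
    have h1 : (key3 start end_ cA).1 = tierB start end_ (evGet cA "onset") := rfl
    have h2 : (key3 start end_ cA).2.1 = evGet cA "midi" := rfl
    omega
  have hle2 : c.2.1 ≤ evGet cA "midi" := by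
    have := hcAmax e0 he0B
    omega
  rw [hcAeq]
  exact congrArg some (le_antisymm hle1 hle2)

theorem A_case1 (events : List (List (String × Int))) (start end_ : Int)
    (h1 : events.filter (fun e => decide (start ≤ evGet e "onset") && decide (evGet e "onset" < end_)) ≠ []) :
    pick_bucket_pitch events start end_ =
      (PySem.List.max2? (events.filter (fun e => decide (start ≤ evGet e "onset") && decide (evGet e "onset" < end_)))
        (fun e => evGet e "midi") (fun e => -(evGet e "onset"))).map (fun e => evGet e "midi") := by
  unfold pick_bucket_pitch
  have hne : (events.filter (fun e => decide (start ≤ evGet e "onset") && decide (evGet e "onset" < end_))).isEmpty = false := by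
    simpa [List.isEmpty_iff] using h1
  simp [hne]

theorem A_case2 (events : List (List (String × Int))) (start end_ : Int)
    (h1 : events.filter (fun e => decide (start ≤ evGet e "onset") && decide (evGet e "onset" < end_)) = [])
    (h2 : events.filter (fun e => decide (evGet e "onset" ≥ start)) ≠ []) :
    pick_bucket_pitch events start end_ =
      (PySem.List.max2? (events.filter (fun e => decide (evGet e "onset" ≥ start)))
        (fun e => evGet e "midi") (fun e => -(evGet e "onset"))).map (fun e => evGet e "midi") := by
  unfold pick_bucket_pitch
  have he1 : (events.filter (fun e => decide (start ≤ evGet e "onset") && decide (evGet e "onset" < end_))).isEmpty = true := by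
    simp [h1]
  have hne : (events.filter (fun e => decide (evGet e "onset" ≥ start))).isEmpty = false := by
    simpa [List.isEmpty_iff] using h2
  simp [he1, hne]

theorem A_case3 (events : List (List (String × Int))) (start end_ : Int)
    (h1 : events.filter (fun e => decide (start ≤ evGet e "onset") && decide (evGet e "onset" < end_)) = [])
    (h2 : events.filter (fun e => decide (evGet e "onset" ≥ start)) = [])
    (h3 : events.filter (fun e => decide (evGet e "onset" < start)) ≠ []) :
    pick_bucket_pitch events start end_ =
      (PySem.List.max2? (events.filter (fun e => decide (evGet e "onset" < start)))
        (fun e => evGet e "midi") (fun e => -(evGet e "onset"))).map (fun e => evGet e "midi") := by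
  unfold pick_bucket_pitch
  have he1 : (events.filter (fun e => decide (start ≤ evGet e "onset") && decide (evGet e "onset" < end_))).isEmpty = true := by
    simp [h1]
  have he2 : (events.filter (fun e => decide (evGet e "onset" ≥ start))).isEmpty = true := by
    simp [h2]
  have hne : (events.filter (fun e => decide (evGet e "onset" < start))).isEmpty = false := by
    simpa [List.isEmpty_iff] using h3
  simp [he1, he2, hne]

-- ===== VERDICT =====
theorem pick_bucket_pitch_spec : Claim_equal_pick_bucket_pitch := by
  intro events start end_ _hdom _hpre
  unfold Spec_pick_bucket_pitch
  cases events with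
  | nil => rfl
  | cons e0 rest =>
    obtain ⟨c, hc, hmem, hcb, hall⟩ := foldB_inv start end_ rest (key3 start end_ e0)
    have hBeq : pick_bucket_pitch_alt (e0 :: rest) start end_ = some c.2.1 := by
      unfold pick_bucket_pitch_alt
      rw [List.foldl_cons]
      exact congrArg (Option.map (fun b => b.2.1)) hc
    have hex : ∃ e ∈ (e0 :: rest), c = key3 start end_ e := by
      rcases hmem with h | ⟨e', he', h⟩
      · exact ⟨e0, by simp, h⟩
      · exact ⟨e', by simp [he'], h⟩
    have hall' : ∀ e ∈ (e0 :: rest), lt3 c (key3 start end_ e) = false := by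
      intro e he
      rcases List.mem_cons.mp he with h | h
      · subst h; exact hcb
      · exact hall e h
    rw [hBeq]
    by_cases h1 : (e0 :: rest).filter (fun e => decide (start ≤ evGet e "onset") && decide (evGet e "onset" < end_)) = []
    · by_cases h2 : (e0 :: rest).filter (fun e => decide (evGet e "onset" ≥ start)) = []
      · -- tier 0: all onsets < start
        have hallzero : ∀ e ∈ (e0 :: rest), evGet e "onset" < start := by
          intro e he
          have := List.filter_eq_nil_iff.mp h2 e he
          simpa using this
        have h3 : (e0 :: rest).filter (fun e => decide (evGet e "onset" < start)) ≠ [] := by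
          intro hnil
          have := List.filter_eq_nil_iff.mp hnil e0 (by simp)
          exact this (by simpa using hallzero e0 (by simp))
        rw [A_case3 _ _ _ h1 h2 h3]
        refine bucket_max (e0 :: rest) _ start end_ 0 c h3 ?_ ?_ hex hall'
        · intro y
          rw [List.mem_filter, tier_eq_zero_iff]
          simp
        · intro e he
          have := hallzero e he
          have := (tier_eq_zero_iff start end_ (evGet e "onset")).mpr this
          omega
      · -- tier 1: no event in bucket, some onset ≥ start
        have hnotwo : ∀ e ∈ (e0 :: rest), ¬ (start ≤ evGet e "onset" ∧ evGet e "onset" < end_) := by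
          intro e he
          have := List.filter_eq_nil_iff.mp h1 e he
          simpa using this
        rw [A_case2 _ _ _ h1 h2]
        refine bucket_max (e0 :: rest) _ start end_ 1 c h2 ?_ ?_ hex hall'
        · intro y
          rw [List.mem_filter]
          constructor
          · rintro ⟨hy, hp⟩
            refine ⟨hy, ?_⟩
            rw [tier_eq_one_iff _ _ _ (hnotwo y hy)]
            simpa using hp
          · rintro ⟨hy, ht⟩
            refine ⟨hy, ?_⟩
            have := (tier_eq_one_iff _ _ _ (hnotwo y hy)).mp ht
            simpa using this
        · intro e he
          have h2' := hnotwo e he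
          have := (tier_eq_two_iff start end_ (evGet e "onset")).not.mpr h2'
          have := tierB_le_two start end_ (evGet e "onset")
          omega
    · -- tier 2: the real bucket is nonempty
      rw [A_case1 _ _ _ h1]
      refine bucket_max (e0 :: rest) _ start end_ 2 c h1 ?_ ?_ hex hall'
      · intro y
        rw [List.mem_filter, tier_eq_two_iff]
        simp
      · intro e he
        exact tierB_le_two start end_ (evGet e "onset")
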